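-- pv_equiv track=rewrite | github.com/dper/rawdog | rawdoglib/rawdog.py | select_detail
-- ===== SOURCE A (Python) =====
-- def select_detail(details):
-- 	"""Pick the preferred type of detail from a list of details."""
-- 	TYPES = {
-- 		"text/html": 30,
-- 		"application/xhtml+xml": 20,
-- 		"text/plain": 10,
-- 		}
--
-- 	if details is None:
-- 		return None
-- 	if type(details) is not list:
-- 		details = [details]
--
-- 	ds = []
-- 	for detail in details:
-- 		ctype = detail.get("type", None)
-- 		if ctype is None:
-- 			continue
-- 		if ctype in TYPES:
-- 			score = TYPES[ctype]
-- 		else: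
-- 			score = 0
-- 		if detail["value"] != "":
-- 			ds.append((score, detail))
-- 	ds.sort()
--
-- 	if len(ds) == 0:
-- 		return None
-- 	else:
-- 		return ds[-1][1]
-- ===== SOURCE B (Python) =====
-- def select_detail(details):
-- 	"""Pick the preferred type of detail from a list of details."""
-- 	TYPES = {
-- 		"text/html": 30,
-- 		"application/xhtml+xml": 20,
-- 		"text/plain": 10,
-- 		}
--
-- 	if details is None:
-- 		return None
-- 	if type(details) is not list:
-- 		details = [details]
--
-- 	best = None  # (score, detail) of the best qualifying detail so far
-- 	for detail in details:
-- 		ctype = detail.get("type", None)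
-- 		if ctype is None:
-- 			continue
-- 		if detail.get("value", "") == "":
-- 			continue
-- 		score = TYPES.get(ctype, 0)
-- 		if best is None or score >= best[0]:
-- 			best = (score, detail)
--
-- 	if best is None:
-- 		return None
-- 	return best[1]
-- ===== Notes on version B (the rewrite author's own statement) =====
-- stated objective: simpler
-- what changed: Replaces the build-a-list-then-sort-and-take-last pass with a single running-best pass (score >= replaces, so the last of equal maxima wins), with no intermediate list and no sort.
import Mathlib
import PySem

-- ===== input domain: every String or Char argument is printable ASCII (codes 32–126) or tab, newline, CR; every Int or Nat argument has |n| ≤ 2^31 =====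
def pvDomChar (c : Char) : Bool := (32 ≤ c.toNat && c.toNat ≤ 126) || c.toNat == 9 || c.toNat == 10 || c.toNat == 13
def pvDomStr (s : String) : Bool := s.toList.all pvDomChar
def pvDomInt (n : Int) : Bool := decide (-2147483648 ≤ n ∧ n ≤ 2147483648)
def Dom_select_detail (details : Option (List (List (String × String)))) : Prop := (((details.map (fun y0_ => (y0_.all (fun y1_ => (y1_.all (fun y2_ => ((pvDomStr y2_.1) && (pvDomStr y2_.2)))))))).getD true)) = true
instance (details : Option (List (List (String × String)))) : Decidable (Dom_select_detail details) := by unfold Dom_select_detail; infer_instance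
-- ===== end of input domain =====

-- B replaces A's build-list-then-sort-and-take-last with a single running-best pass (>= keeps the
-- last of equal maxima); simpler, no sort, no intermediate list.

-- the TYPES constant both Pythons define locally
def pvTYPES : PySem.Dict String Int :=
  PySem.Dict.ofList [("text/html", 30), ("application/xhtml+xml", 20), ("text/plain", 10)]

-- ===== PORT A =====
-- loop body of A's `for detail in details` loop
def pvStepA (ds : List (Int × List (String × String))) (detail : List (String × String)) :
    List (Int × List (String × String)) :=
  let d := PySem.Dict.ofList detail
  match d.get? "type" with
  | none => ds
  | some ctype =>
    let score := if pvTYPES.contains ctype then pvTYPES.getD ctype 0 else 0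
    -- detail["value"]: under Pre_ the "value" key exists whenever "type" does (a missing key is a
    -- KeyError, excluded by Pre_), so the total getD is exact there
    if (PySem.Dict.ofList detail).getD "value" "" ≠ "" then ds ++ [(score, detail)] else ds

def select_detail (details : Option (List (List (String × String)))) : Option (List (String × String)) :=
  match details with
  | none => none
  | some l =>
    -- the typed input is None or a list of dicts, so `type(details) is not list` is never true
    let ds := l.foldl pvStepA []
    -- ds.sort(): Python sorts the (score, dict) tuples; under Pre_ equal scores occur only between
    -- identical details (on a genuine tie Python's dict comparison raises TypeError, excluded by
    -- Pre_), so the stable sort on the score component is exact there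
    let ds := PySem.List.sorted ds (fun p => p.1) false
    if ds.length = 0 then none
    else some (PySem.List.pyGetD ds (-1) (0, [])).2

-- ===== PORT B =====
-- loop body of B's single running-best pass
def pvStepB (best : Option (Int × List (String × String))) (detail : List (String × String)) :
    Option (Int × List (String × String)) :=
  match (PySem.Dict.ofList detail).get? "type" with
  | none => best
  | some ctype =>
    if (PySem.Dict.ofList detail).getD "value" "" = "" then best
    else
      let score := pvTYPES.getD ctype 0
      match best with
      | none => some (score, detail)
      | some b => if b.1 ≤ score then some (score, detail) else best

def select_detail_alt (details : Option (List (List (String × String)))) : Option (List (String × String)) :=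
  match details with
  | none => none
  | some l => (l.foldl pvStepB none).map (·.2)

-- ===== PRECONDITION & SPEC =====
-- helpers Pre_ reads the input through (no port is reached)
def pvHasType (detail : List (String × String)) : Bool := (PySem.Dict.ofList detail).contains "type"
def pvHasValue (detail : List (String × String)) : Bool := (PySem.Dict.ofList detail).contains "value"
def pvQual (detail : List (String × String)) : Bool :=
  pvHasType detail && ((PySem.Dict.ofList detail).getD "value" "" != "")
def pvScore (detail : List (String × String)) : Int :=
  pvTYPES.getD ((PySem.Dict.ofList detail).getD "type" "") 0

-- Pre_ excludes exactly the inputs on which A raises — a detail with a "type" key but no "value"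
-- key (KeyError), or two distinct equally-scored qualifying details (A's tuple sort compares the
-- detail dicts: TypeError); the rare reordered-duplicate pair, which Python's order-insensitive
-- dict equality lets A return on, is excluded with the latter (see claim cites).
def Pre_select_detail (details : Option (List (List (String × String)))) : Prop :=
  (∀ d ∈ details.getD [], pvHasType d = true → pvHasValue d = true) ∧
  (details.getD []).Pairwise
    (fun a b => pvQual a = true → pvQual b = true → pvScore a = pvScore b → a = b)
instance (details : Option (List (List (String × String)))) : Decidable (Pre_select_detail details) := by
  unfold Pre_select_detail; infer_instance

def pvWitness_select_detail : (Option (List (List (String × String)))) :=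
  some [[("type", "text/html"), ("value", "v")], [("type", "text/plain"), ("value", "p")]]

def Spec_select_detail (details : Option (List (List (String × String)))) (out : Option (List (String × String))) : Prop := out = select_detail_alt details
instance (details : Option (List (List (String × String)))) (out : Option (List (String × String))) : Decidable (Spec_select_detail details out) := by unfold Spec_select_detail; infer_instance

-- ===== CLAIM (what is proved, stated in full; the proofs are below) =====
def Claim_equal_select_detail : Prop := ∀ (details : Option (List (List (String × String)))), Dom_select_detail details → Pre_select_detail details → Spec_select_detail details (select_detail details)

-- ===== LEMMAS AND PROOFS =====

-- the (score, detail) entry a qualifying detail contributes, none for a skipped detail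
def pvEntry? (detail : List (String × String)) : Option (Int × List (String × String)) :=
  match (PySem.Dict.ofList detail).get? "type" with
  | none => none
  | some ctype =>
    if (PySem.Dict.ofList detail).getD "value" "" = "" then none
    else some (pvTYPES.getD ctype 0, detail)

-- the running-best step on entries
def pvStep (best : Option (Int × List (String × String))) (e : Int × List (String × String)) :
    Option (Int × List (String × String)) :=
  match best with
  | none => some e
  | some b => if b.1 ≤ e.1 then some e else best

theorem pv_score_norm (c : String) :
    (if pvTYPES.contains c then pvTYPES.getD c 0 else 0) = pvTYPES.getD c 0 := by
  by_cases h : pvTYPES.contains c = true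
  · simp [h]
  · have hn : pvTYPES.get? c = none :=
      (PySem.Dict.get?_eq_none_iff_contains pvTYPES c).mpr (by simpa using h)
    simp [h, PySem.Dict.getD, hn]

theorem pvStepA_eq (ds : List (Int × List (String × String))) (detail : List (String × String)) :
    pvStepA ds detail = ds ++ (pvEntry? detail).toList := by
  unfold pvStepA pvEntry?
  cases h : (PySem.Dict.ofList detail).get? "type" with
  | none => simp [h]
  | some c => by_cases hv : (PySem.Dict.ofList detail).getD "value" "" = "" <;>
      simp [h, hv, pv_score_norm]

theorem foldA_eq (l : List (List (String × String))) (acc : List (Int × List (String × String))) :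
    l.foldl pvStepA acc = acc ++ l.filterMap pvEntry? := by
  induction l generalizing acc with
  | nil => simp
  | cons d t ih =>
    simp only [List.foldl_cons, List.filterMap_cons, pvStepA_eq]
    cases h : pvEntry? d with
    | none => simpa using ih acc
    | some e => simp [ih, List.append_assoc]

theorem pvStepB_eq (best : Option (Int × List (String × String))) (detail : List (String × String)) :
    pvStepB best detail = match pvEntry? detail with | none => best | some e => pvStep best e := by
  unfold pvStepB pvEntry? pvStep
  cases h : (PySem.Dict.ofList detail).get? "type" with
  | none => rfl
  | some c =>
    by_cases hv : (PySem.Dict.ofList detail).getD "value" "" = "" <;> cases best <;> simp [hv]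

theorem foldB_eq (l : List (List (String × String))) (best : Option (Int × List (String × String))) :
    l.foldl pvStepB best = (l.filterMap pvEntry?).foldl pvStep best := by
  induction l generalizing best with
  | nil => rfl
  | cons d t ih =>
    simp only [List.foldl_cons, List.filterMap_cons, pvStepB_eq]
    cases h : pvEntry? d with
    | none => exact ih best
    | some e => exact ih (pvStep best e)

theorem pvStep_props (es : List (Int × List (String × String))) (b0 : Int × List (String × String)) :
    ∃ b, es.foldl pvStep (some b0) = some b ∧ (b = b0 ∨ b ∈ es) ∧ b0.1 ≤ b.1 ∧
      ∀ e ∈ es, e.1 ≤ b.1 := by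
  induction es generalizing b0 with
  | nil => exact ⟨b0, rfl, Or.inl rfl, le_refl _, by simp⟩
  | cons e t ih =>
    simp only [List.foldl_cons]
    by_cases h : b0.1 ≤ e.1
    · have hstep : pvStep (some b0) e = some e := by simp [pvStep, h]
      rw [hstep]
      obtain ⟨b, hf, hm, hle, hmax⟩ := ih e
      refine ⟨b, hf, ?_, le_trans h hle, ?_⟩
      · rcases hm with rfl | hb
        · exact Or.inr (List.mem_cons_self ..)
        · exact Or.inr (List.mem_cons_of_mem _ hb)
      · intro x hx
        rcases List.mem_cons.mp hx with rfl | hx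
        · omega
        · exact hmax x hx
    · have hstep : pvStep (some b0) e = some b0 := by simp [pvStep, h]
      rw [hstep]
      obtain ⟨b, hf, hm, hle, hmax⟩ := ih b0
      refine ⟨b, hf, ?_, hle, ?_⟩
      · rcases hm with rfl | hb
        · exact Or.inl rfl
        · exact Or.inr (List.mem_cons_of_mem _ hb)
      · intro x hx
        rcases List.mem_cons.mp hx with rfl | hx
        · omega
        · exact hmax x hx

theorem pvEntry?_chars (d : List (String × String)) (e : Int × List (String × String))
    (h : pvEntry? d = some e) : e.2 = d ∧ e.1 = pvScore d ∧ pvQual d = true := by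
  unfold pvEntry? at h
  cases hc : (PySem.Dict.ofList d).get? "type" with
  | none => simp [hc] at h
  | some c =>
    rw [hc] at h
    by_cases hv : (PySem.Dict.ofList d).getD "value" "" = ""
    · simp [hv] at h
    · simp only [hv, if_false] at h
      injection h with h'
      subst h'
      have hgd : (PySem.Dict.ofList d).getD "type" "" = c := by
        simp [PySem.Dict.getD, hc]
      have hht : pvHasType d = true := by
        unfold pvHasType
        cases hcc : (PySem.Dict.ofList d).contains "type"
        · rw [(PySem.Dict.get?_eq_none_iff_contains (PySem.Dict.ofList d) "type").mpr hcc] at hc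
          exact absurd hc (by simp)
        · rfl
      exact ⟨rfl, by simp [pvScore, hgd], by simp [pvQual, hht, hv]⟩

-- every member of a key-sorted list scores at most its last element
theorem pv_last_max (es : List (Int × List (String × String))) (h : PySem.List.sorted es (fun p => p.1) false ≠ []) :
    ∀ x ∈ PySem.List.sorted es (fun p => p.1) false,
      x.1 ≤ ((PySem.List.sorted es (fun p => p.1) false).getLast h).1 := by
  intro x hx
  have hp := PySem.List.sorted_pairwise es (fun p => p.1)
  have hsplit := List.dropLast_append_getLast h
  rw [← hsplit] at hp hx
  rcases List.mem_append.mp hx with hx | hx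
  · exact (List.pairwise_append.mp hp).2.2 x hx _ (by simp)
  · simp at hx; simp [hx]

theorem pv_core (es : List (Int × List (String × String)))
    (htie : ∀ e1 ∈ es, ∀ e2 ∈ es, e1.1 = e2.1 → e1 = e2) :
    (if (PySem.List.sorted es (fun p => p.1) false).length = 0 then none
     else some (PySem.List.pyGetD (PySem.List.sorted es (fun p => p.1) false) (-1) (0, [])).2)
      = (es.foldl pvStep none).map (·.2) := by
  cases es with
  | nil => simp
  | cons e t =>
    have hsne : PySem.List.sorted (e :: t) (fun p => p.1) false ≠ [] := by
      simp [PySem.List.sorted_eq_nil_iff]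
    have hlen : ¬ (PySem.List.sorted (e :: t) (fun p => p.1) false).length = 0 := by
      rw [List.length_eq_zero_iff]
      exact hsne
    rw [if_neg hlen, List.foldl_cons]
    have hstep1 : pvStep none e = some e := rfl
    rw [hstep1]
    obtain ⟨b, hfold, hbmem, hble, hbmax⟩ := pvStep_props t e
    rw [hfold]
    have hbes : b ∈ e :: t := by
      rcases hbmem with rfl | hb
      · exact List.mem_cons_self ..
      · exact List.mem_cons_of_mem _ hb
    have hlast_mem : (PySem.List.sorted (e :: t) (fun p => p.1) false).getLast hsne ∈ e :: t := by
      rw [← PySem.List.mem_sorted (e :: t) (fun p => p.1) false]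
      exact List.getLast_mem hsne
    have hb_max : ∀ x ∈ e :: t, x.1 ≤ b.1 := by
      intro x hx
      rcases List.mem_cons.mp hx with rfl | hx
      · exact hble
      · exact hbmax x hx
    have hlast_max : ∀ x ∈ e :: t,
        x.1 ≤ ((PySem.List.sorted (e :: t) (fun p => p.1) false).getLast hsne).1 := by
      intro x hx
      exact pv_last_max (e :: t) hsne x
        ((PySem.List.mem_sorted (e :: t) (fun p => p.1) false x).mpr hx)
    have hsc : b.1 = ((PySem.List.sorted (e :: t) (fun p => p.1) false).getLast hsne).1 :=
      le_antisymm (hlast_max b hbes) (hb_max _ hlast_mem)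
    have hbl : b = (PySem.List.sorted (e :: t) (fun p => p.1) false).getLast hsne :=
      htie b hbes _ hlast_mem hsc
    rw [PySem.List.pyGetD_neg_one _ (0, []) hsne, ← hbl]
    simp

theorem select_detail_eq_alt (details : Option (List (List (String × String))))
    (hpre : Pre_select_detail details) : select_detail details = select_detail_alt details := by
  cases details with
  | none => rfl
  | some l =>
    obtain ⟨-, h2⟩ := hpre
    show (let ds := l.foldl pvStepA [];
          let ds := PySem.List.sorted ds (fun p => p.1) false;
          if ds.length = 0 then none else some (PySem.List.pyGetD ds (-1) (0, [])).2)
        = (l.foldl pvStepB none).map (·.2)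
    rw [foldA_eq, foldB_eq]
    simp only [List.nil_append]
    refine pv_core (l.filterMap pvEntry?) ?_
    intro e1 he1 e2 he2 hsc
    obtain ⟨d1, hd1, he1'⟩ := List.mem_filterMap.mp he1
    obtain ⟨d2, hd2, he2'⟩ := List.mem_filterMap.mp he2
    obtain ⟨hv1, hs1, hq1⟩ := pvEntry?_chars d1 e1 he1'
    obtain ⟨hv2, hs2, hq2⟩ := pvEntry?_chars d2 e2 he2'
    have hsym : Symmetric (fun (a b : List (String × String)) =>
        pvQual a = true → pvQual b = true → pvScore a = pvScore b → a = b) := by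
      intro a b hab hqb hqa hs
      exact (hab hqa hqb hs.symm).symm
    have hd : d1 = d2 := by
      by_cases hne : d1 = d2
      · exact hne
      · exact (List.Pairwise.forall hsym h2) hd1 hd2 hne hq1 hq2 (by rw [← hs1, ← hs2, hsc])
    have he1e : e1 = (e1.1, d1) := by rw [← hv1]
    rw [he1e, hd, hsc, ← hv2]

-- ===== VERDICT (by name: the statement is the Claim_ definition above) =====
theorem select_detail_spec : Claim_equal_select_detail := by
  intro details _ hpre
  unfold Spec_select_detail
  exact select_detail_eq_alt details hpre
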